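-- pv_equiv track=rewrite | github.com/MrBrantCode/unitest_baseline | mut_generate/mist_train_cf/cf_69271/solution.py | get_even_and_merge
-- ===== SOURCE A (Python) =====
-- def get_even_and_merge(l1: list, l2: list):
--     """Return only even numbers from both lists, merged and sorted in descending order."""
--
--     def merge_and_sort(m: list, n: list):
--         """Merge and sort lists in descending order."""
--         merged_list = m + n
--         sorted_list = sorted(merged_list, reverse=True)
--         return sorted_list
--
--     even_numbers_l1 = [num1 for num1 in l1 if num1 % 2 == 0]
--     even_numbers_l2 = [num2 for num2 in l2 if num2 % 2 == 0]
--
--     return merge_and_sort(even_numbers_l1, even_numbers_l2)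
-- ===== SOURCE B (Python) =====
-- def get_even_and_merge(l1: list, l2: list):
--     """Return only even numbers from both lists, merged and sorted in descending order."""
--     a = sorted([x for x in l1 if x % 2 == 0], reverse=True)
--     b = sorted([x for x in l2 if x % 2 == 0], reverse=True)
--     out = []
--     i = j = 0
--     while i < len(a) and j < len(b):
--         if a[i] >= b[j]:
--             out.append(a[i]); i += 1
--         else:
--             out.append(b[j]); j += 1
--     out.extend(a[i:])
--     out.extend(b[j:])
--     return out
-- ===== Notes on version B (the rewrite author's own statement) =====
-- stated objective: alternative
-- what changed: Instead of concatenating the two filtered lists and sorting the whole thing once, B sorts each filtered list separately and combines them with an explicit two-pointer descending merge.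
import Mathlib
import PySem

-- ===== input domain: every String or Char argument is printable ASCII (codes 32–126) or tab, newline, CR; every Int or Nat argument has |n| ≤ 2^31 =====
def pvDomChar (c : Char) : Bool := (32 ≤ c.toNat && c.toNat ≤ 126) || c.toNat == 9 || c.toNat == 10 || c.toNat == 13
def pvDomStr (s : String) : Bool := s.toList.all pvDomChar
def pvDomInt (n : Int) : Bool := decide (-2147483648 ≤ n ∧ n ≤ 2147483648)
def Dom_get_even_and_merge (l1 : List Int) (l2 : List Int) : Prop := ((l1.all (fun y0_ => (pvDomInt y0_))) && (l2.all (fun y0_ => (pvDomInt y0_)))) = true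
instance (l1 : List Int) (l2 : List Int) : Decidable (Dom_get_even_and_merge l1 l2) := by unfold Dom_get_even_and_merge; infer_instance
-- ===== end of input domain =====

-- B replaces A's single global descending sort of the concatenation by sorting each
-- filtered list separately and combining them with an explicit two-pointer descending merge
-- (objective: alternative; same return value).

-- ===== PORT A =====
def pvMergeAndSort (m : List Int) (n : List Int) : List Int :=
  let merged_list := m ++ n
  let sorted_list := PySem.List.sorted merged_list (fun x => x) true
  sorted_list

def get_even_and_merge (l1 : List Int) (l2 : List Int) : List Int :=
  let even_numbers_l1 := l1.filter (fun num1 => PySem.Int.mod num1 2 == 0)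
  let even_numbers_l2 := l2.filter (fun num2 => PySem.Int.mod num2 2 == 0)
  pvMergeAndSort even_numbers_l1 even_numbers_l2

-- ===== PORT B =====
-- the two-pointer while loop of Source B as structural recursion on the two lists
def pvMergeDesc : List Int → List Int → List Int
  | [], ys => ys
  | xs, [] => xs
  | x :: xs, y :: ys =>
      if x ≥ y then x :: pvMergeDesc xs (y :: ys)
      else y :: pvMergeDesc (x :: xs) ys

def get_even_and_merge_alt (l1 : List Int) (l2 : List Int) : List Int :=
  let a := PySem.List.sorted (l1.filter (fun x => PySem.Int.mod x 2 == 0)) (fun x => x) true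
  let b := PySem.List.sorted (l2.filter (fun x => PySem.Int.mod x 2 == 0)) (fun x => x) true
  pvMergeDesc a b

-- ===== PRECONDITION & SPEC =====
def Spec_get_even_and_merge (l1 : List Int) (l2 : List Int) (out : List Int) : Prop := out = get_even_and_merge_alt l1 l2
instance (l1 : List Int) (l2 : List Int) (out : List Int) : Decidable (Spec_get_even_and_merge l1 l2 out) := by unfold Spec_get_even_and_merge; infer_instance

-- ===== CLAIM (what is proved, stated in full; the proofs are below) =====
def Claim_equal_get_even_and_merge : Prop := ∀ (l1 : List Int) (l2 : List Int), Dom_get_even_and_merge l1 l2 → Spec_get_even_and_merge l1 l2 (get_even_and_merge l1 l2)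

-- ===== LEMMAS AND PROOFS =====

theorem pvMergeDesc_perm (xs ys : List Int) : (pvMergeDesc xs ys).Perm (xs ++ ys) := by
  induction xs generalizing ys with
  | nil => simp [pvMergeDesc]
  | cons x xs ih =>
    induction ys with
    | nil => simp [pvMergeDesc]
    | cons y ys ihy =>
      by_cases h : x ≥ y
      · simpa [pvMergeDesc, h] using (ih (y :: ys)).cons x
      · simp only [pvMergeDesc, h, if_false]
        refine List.Perm.trans (ihy.cons y) ?_
        exact (List.perm_middle (a := y) (l₁ := x :: xs) (l₂ := ys)).symm

theorem mem_pvMergeDesc {z : Int} {xs ys : List Int} (h : z ∈ pvMergeDesc xs ys) :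
    z ∈ xs ∨ z ∈ ys := by
  have := (pvMergeDesc_perm xs ys).mem_iff.mp h
  simpa using this

theorem pvMergeDesc_pairwise {xs ys : List Int}
    (hx : xs.Pairwise (fun a b => b ≤ a)) (hy : ys.Pairwise (fun a b => b ≤ a)) :
    (pvMergeDesc xs ys).Pairwise (fun a b => b ≤ a) := by
  induction xs generalizing ys with
  | nil => simpa [pvMergeDesc] using hy
  | cons x xs ih =>
    induction ys with
    | nil => simpa [pvMergeDesc] using hx
    | cons y ys ihy =>
      rcases List.pairwise_cons.mp hx with ⟨hxhead, hxtail⟩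
      rcases List.pairwise_cons.mp hy with ⟨hyhead, hytail⟩
      by_cases h : x ≥ y
      · simp only [pvMergeDesc, h, if_true]
        refine List.pairwise_cons.mpr ⟨?_, ih hxtail hy⟩
        intro z hz
        rcases mem_pvMergeDesc hz with hzx | hzy
        · exact hxhead z hzx
        · rcases List.mem_cons.mp hzy with rfl | hzy'
          · exact h
          · exact le_trans (hyhead z hzy') h
      · simp only [pvMergeDesc, h, if_false]
        refine List.pairwise_cons.mpr ⟨?_, ihy hytail⟩
        intro z hz
        rcases mem_pvMergeDesc hz with hzx | hzy
        · rcases List.mem_cons.mp hzx with rfl | hzx'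
          · exact le_of_not_ge h
          · exact le_trans (hxhead z hzx') (le_of_not_ge h)
        · exact hyhead z hzy

theorem get_even_and_merge_spec : Claim_equal_get_even_and_merge := by
  intro l1 l2 _
  show get_even_and_merge l1 l2 = get_even_and_merge_alt l1 l2
  unfold get_even_and_merge get_even_and_merge_alt pvMergeAndSort
  set e1 := l1.filter (fun x => PySem.Int.mod x 2 == 0) with he1
  set e2 := l2.filter (fun x => PySem.Int.mod x 2 == 0) with he2
  have ha : (PySem.List.sorted (e1 ++ e2) (fun x => x) true).Pairwise (fun a b : Int => b ≤ a) :=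
    PySem.List.sorted_pairwise_rev (e1 ++ e2) (fun x => x)
  have hb : (pvMergeDesc (PySem.List.sorted e1 (fun x => x) true)
        (PySem.List.sorted e2 (fun x => x) true)).Pairwise (fun a b : Int => b ≤ a) :=
    pvMergeDesc_pairwise (PySem.List.sorted_pairwise_rev e1 (fun x => x))
      (PySem.List.sorted_pairwise_rev e2 (fun x => x))
  have hperm : (PySem.List.sorted (e1 ++ e2) (fun x => x) true).Perm
      (pvMergeDesc (PySem.List.sorted e1 (fun x => x) true)
        (PySem.List.sorted e2 (fun x => x) true)) := by
    refine (PySem.List.sorted_perm _ _ _).trans ?_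
    refine List.Perm.symm ?_
    refine (pvMergeDesc_perm _ _).trans ?_
    exact List.Perm.append (PySem.List.sorted_perm _ _ _) (PySem.List.sorted_perm _ _ _)
  exact hperm.eq_of_pairwise (fun a b _ _ h1 h2 => le_antisymm h2 h1) ha hb
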